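-- pv_equiv track=rewrite | github.com/ZckFreedom/Mathworks | db_sqence/其他论文中用到的/fastDB.py | if_nk
-- ===== SOURCE A (Python) =====
-- def if_nk(sequence):
-- 	period = 1
-- 	size = len(sequence)
-- 	for i in range(1, size):
-- 		if sequence[i] > sequence[i-period]:
-- 			period = i+1
-- 		elif sequence[i] < sequence[i-period]:
-- 			return False
-- 	return size % period == 0
-- ===== SOURCE B (Python) =====
-- def if_nk(sequence):
--     n = len(sequence)
--     return all(sequence <= sequence[i:] + sequence[:i] for i in range(n))
-- ===== Notes on version B (the rewrite author's own statement) =====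
-- stated objective: alternative
-- what changed: Replaced the single-pass running-period scan by the necklace definition itself: generate every rotation sequence[i:]+sequence[:i] and test that the sequence is lexicographically <= each of them.
import Mathlib
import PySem

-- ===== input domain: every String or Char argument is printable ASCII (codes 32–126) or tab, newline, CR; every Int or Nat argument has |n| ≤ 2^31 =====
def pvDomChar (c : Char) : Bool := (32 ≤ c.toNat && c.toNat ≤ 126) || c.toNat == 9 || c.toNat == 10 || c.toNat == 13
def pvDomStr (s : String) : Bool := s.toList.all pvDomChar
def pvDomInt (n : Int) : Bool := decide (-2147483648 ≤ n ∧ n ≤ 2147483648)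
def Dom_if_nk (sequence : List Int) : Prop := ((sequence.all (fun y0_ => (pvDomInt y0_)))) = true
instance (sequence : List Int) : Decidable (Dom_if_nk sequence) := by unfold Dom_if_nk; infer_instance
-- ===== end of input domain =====

-- B replaces A's one-pass running-period scan by the definition of a necklace: compare the
-- sequence with every rotation sequence[i:] + sequence[:i] (objective: alternative, not faster).

-- ===== PORT A =====
-- the for-loop with early return, as structural recursion on the index; period ≤ i always,
-- so both pyGet? calls are in range (the `| _, _ =>` arm models the unreachable IndexError)
def if_nk_loop (sequence : List Int) (i period : Nat) : Bool :=
  if _h : i < sequence.length then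
    match PySem.List.pyGet? sequence (i : Int),
          PySem.List.pyGet? sequence ((i : Int) - (period : Int)) with
    | some a, some b =>
      if b < a then if_nk_loop sequence (i + 1) (i + 1)
      else if a < b then false
      else if_nk_loop sequence (i + 1) period
    | _, _ => false
  else PySem.Int.mod (sequence.length : Int) (period : Int) == 0
termination_by sequence.length - i

def if_nk (sequence : List Int) : Bool := if_nk_loop sequence 1 1

-- ===== PORT B =====
-- Python's `<=` on lists of ints, element by element
def pyLe : List Int → List Int → Bool
  | [], _ => true
  | _ :: _, [] => false
  | a :: as, b :: bs => if a < b then true else if b < a then false else pyLe as bs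

def if_nk_alt (sequence : List Int) : Bool :=
  (PySem.List.pyRange 0 (sequence.length : Int) 1).all fun i =>
    pyLe sequence
      (PySem.List.slice sequence (some i) none ++ PySem.List.slice sequence none (some i))

-- ===== PRECONDITION & SPEC =====
def Spec_if_nk (sequence : List Int) (out : Bool) : Prop := out = if_nk_alt sequence
instance (sequence : List Int) (out : Bool) : Decidable (Spec_if_nk sequence out) := by unfold Spec_if_nk; infer_instance

-- ===== CLAIM (what is proved, stated in full; the proofs are below) =====
def Claim_equal_if_nk : Prop := ∀ (sequence : List Int), Dom_if_nk sequence → Spec_if_nk sequence (if_nk sequence)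

-- ===== LEMMAS AND PROOFS =====

-- the sequence read as a total function (indices are always in range where it is used)
def fIdx (l : List Int) (j : Nat) : Int := l.getD j 0

-- the prefix l[0:i] is period-p periodic (loop invariant of A's `elif`-free steps)
def PerB (l : List Int) (i p : Nat) : Prop :=
  ∀ j, p ≤ j → j < i → fIdx l j = fIdx l (j - p)

-- l[0:p] is strictly smaller than each of its proper suffixes, with the first strict
-- difference inside l[0:p] (the Lyndon-prefix loop invariant of A)
def LynW (l : List Int) (p : Nat) : Prop :=
  ∀ r, 1 ≤ r → r < p →
    ∃ k, k + r < p ∧ (∀ x, x < k → fIdx l x = fIdx l (x + r)) ∧ fIdx l k < fIdx l (k + r)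

def rotL (l : List Int) (q : Nat) : List Int := l.drop q ++ l.take q

lemma rotL_length (l : List Int) (q : Nat) (hq : q ≤ l.length) :
    (rotL l q).length = l.length := by
  simp [rotL]; omega

lemma rotL_getD (l : List Int) (q k : Nat) (hq : q ≤ l.length) (hk : k < l.length) :
    fIdx (rotL l q) k =
      if k + q < l.length then fIdx l (k + q) else fIdx l (k + q - l.length) := by
  unfold fIdx rotL
  by_cases h : k + q < l.length
  · rw [if_pos h]
    have hlen : k < (l.drop q).length := by simp; omega
    rw [List.getD_eq_getElem _ _ (by simp [List.length_append]; omega),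
        List.getD_eq_getElem _ _ (by omega),
        List.getElem_append_left hlen, List.getElem_drop]
    congr 1; omega
  · rw [if_neg h]
    have hlen : ¬ k < (l.drop q).length := by simp; omega
    rw [List.getD_eq_getElem _ _ (by simp [List.length_append]; omega),
        List.getD_eq_getElem _ _ (by omega)]
    rw [List.getElem_append_right (by omega)]
    rw [List.getElem_take]
    congr 1; · simp; omega

lemma pyLe_of_eq (a : List Int) : ∀ b : List Int, a.length = b.length →
    (∀ k, k < a.length → fIdx a k = fIdx b k) → pyLe a b = true := by
  induction a with
  | nil => intro b _ _; simp [pyLe]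
  | cons x xs ih =>
    intro b hlen he
    cases b with
    | nil => simp at hlen
    | cons y ys =>
      have h0 : x = y := he 0 (by simp)
      simp only [pyLe, h0, lt_irrefl, if_false]
      exact ih ys (by simpa using hlen) (fun k hk => he (k + 1) (by simpa using hk))

lemma pyLe_of_lt (a : List Int) : ∀ (b : List Int) (k0 : Nat), a.length = b.length →
    k0 < a.length → (∀ k, k < k0 → fIdx a k = fIdx b k) → fIdx a k0 < fIdx b k0 →
    pyLe a b = true := by
  induction a with
  | nil => intro b k0 _ hk; simp at hk
  | cons x xs ih =>
    intro b k0 hlen hk he hs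
    cases b with
    | nil => simp at hlen
    | cons y ys =>
      cases k0 with
      | zero =>
        have : x < y := hs
        simp [pyLe, this]
      | succ k0 =>
        have h0 : x = y := he 0 (by omega)
        simp only [pyLe, h0, lt_irrefl, if_false]
        exact ih ys k0 (by simpa using hlen) (by simpa using hk)
          (fun k hk' => he (k + 1) (by omega)) hs

lemma pyLe_of_gt (a : List Int) : ∀ (b : List Int) (k0 : Nat), a.length = b.length →
    k0 < a.length → (∀ k, k < k0 → fIdx a k = fIdx b k) → fIdx b k0 < fIdx a k0 →
    pyLe a b = false := by
  induction a with
  | nil => intro b k0 _ hk; simp at hk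
  | cons x xs ih =>
    intro b k0 hlen hk he hs
    cases b with
    | nil => simp at hlen
    | cons y ys =>
      cases k0 with
      | zero =>
        have h1 : y < x := hs
        simp [pyLe, h1, not_lt.mpr (le_of_lt h1)]
      | succ k0 =>
        have h0 : x = y := he 0 (by omega)
        simp only [pyLe, h0, lt_irrefl, if_false]
        exact ih ys k0 (by simpa using hlen) (by simpa using hk)
          (fun k hk' => he (k + 1) (by omega)) hs

-- periodicity in mod form
lemma perB_mod (l : List Int) (i p : Nat) (hp : 1 ≤ p) (hb : PerB l i p) :
    ∀ j, j < i → fIdx l j = fIdx l (j % p) := by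
  intro j
  induction j using Nat.strong_induction_on with
  | _ j ih =>
    intro hj
    by_cases hjp : j < p
    · rw [Nat.mod_eq_of_lt hjp]
    · have h1 : fIdx l j = fIdx l (j - p) := hb j (by omega) hj
      have h2 : fIdx l (j - p) = fIdx l ((j - p) % p) := ih (j - p) (by omega) (by omega)
      have h3 : (j - p) % p = j % p := by
        conv_rhs => rw [show j = (j - p) + p by omega]
        rw [Nat.add_mod_right]
      rw [h1, h2, h3]

lemma if_nk_alt_iff (l : List Int) :
    if_nk_alt l = true ↔ ∀ q : Nat, q < l.length → pyLe l (rotL l q) = true := by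
  unfold if_nk_alt
  rw [List.all_eq_true]
  constructor
  · intro h q hq
    have hm : (q : Int) ∈ PySem.List.pyRange 0 (l.length : Int) 1 := by
      rw [PySem.List.mem_pyRange_one]
      constructor
      · positivity
      · exact_mod_cast hq
    have := h (q : Int) hm
    rwa [PySem.List.slice_from_natCast, PySem.List.slice_to_natCast] at this
  · intro h i hi
    rw [PySem.List.mem_pyRange_one] at hi
    obtain ⟨h0, hn⟩ := hi
    lift i to ℕ using h0 with q
    rw [PySem.List.slice_from_natCast, PySem.List.slice_to_natCast]
    exact h q (by exact_mod_cast hn)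

-- A returns True (period divides length): every rotation is ≥ the sequence
lemma rots_ge_of_dvd (l : List Int) (p : Nat) (hp : 1 ≤ p) (hb : PerB l l.length p)
    (hc : LynW l p) (hd : p ∣ l.length) :
    ∀ q, q < l.length → pyLe l (rotL l q) = true := by
  intro q hq
  have hn0 : 0 < l.length := by omega
  have hpn : p ≤ l.length := Nat.le_of_dvd hn0 hd
  have hmod := perB_mod l l.length p hp hb
  -- uniform value of the rotation
  have hrot : ∀ k, k < l.length → fIdx (rotL l q) k = fIdx l ((k + q) % p) := by
    intro k hk
    rw [rotL_getD l q k (by omega) hk]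
    by_cases h : k + q < l.length
    · rw [if_pos h]; exact hmod (k + q) h
    · rw [if_neg h]
      have h1 : fIdx l (k + q - l.length) = fIdx l ((k + q - l.length) % p) :=
        hmod _ (by omega)
      have h2 : (k + q - l.length) % p = (k + q) % p := by
        obtain ⟨t, ht⟩ := hd
        conv_rhs => rw [show k + q = (k + q - l.length) + p * t by omega]
        rw [Nat.mul_comm, Nat.add_mul_mod_self_right]
      rw [h1, h2]
  have hlen : l.length = (rotL l q).length := (rotL_length l q (by omega)).symm
  by_cases hr : q % p = 0
  · -- rotation by a multiple of the period: equal
    apply pyLe_of_eq _ _ hlen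
    intro k hk
    rw [hrot k hk, hmod k hk]
    congr 1
    conv_rhs => rw [show k + q = k + p * (q / p) by
      have := Nat.div_add_mod q p; omega]
    rw [Nat.mul_comm, Nat.add_mul_mod_self_right]
  · set r := q % p with hrdef
    have hr1 : 1 ≤ r := by omega
    have hrp : r < p := Nat.mod_lt _ (by omega)
    obtain ⟨k0, hk0p, hz, hs⟩ := hc r hr1 hrp
    have hkey : ∀ x, x + r < p → (x + q) % p = x + r := by
      intro x hx
      have : (x + q) % p = (x + q % p) % p := by
        conv_lhs => rw [show x + q = (x + q % p) + p * (q / p) by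
          have := Nat.div_add_mod q p; omega]
        rw [Nat.mul_comm, Nat.add_mul_mod_self_right]
      rw [this, ← hrdef, Nat.mod_eq_of_lt hx]
    apply pyLe_of_lt _ _ k0 hlen (by omega)
    · intro k hk
      rw [hrot k (by omega), hkey k (by omega), hmod k (by omega),
          Nat.mod_eq_of_lt (by omega)]
      exact hz k hk
    · rw [hrot k0 (by omega), hkey k0 (by omega), hmod k0 (by omega),
          Nat.mod_eq_of_lt (by omega)]
      exact hs

-- A returns False at the end (period does not divide length): some rotation is < the sequence
lemma rot_lt_of_not_dvd (l : List Int) (p : Nat) (hp : 1 ≤ p) (hpn : p ≤ l.length)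
    (hb : PerB l l.length p) (hc : LynW l p) (hnd : ¬ p ∣ l.length) :
    ∃ q, q < l.length ∧ pyLe l (rotL l q) = false := by
  have hmod := perB_mod l l.length p hp hb
  set d := l.length % p with hddef
  have hd1 : 1 ≤ d := by
    rcases Nat.eq_zero_or_pos d with h | h
    · exact absurd (Nat.dvd_of_mod_eq_zero (by rw [← hddef]; omega)) hnd
    · exact h
  have hdp : d < p := Nat.mod_lt _ (by omega)
  set q0 := l.length - d with hq0def
  have hq0 : q0 % p = 0 := by
    have := Nat.div_add_mod l.length p
    have : q0 = p * (l.length / p) := by omega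
    rw [this, Nat.mul_comm, Nat.mul_mod_left]
  obtain ⟨k0, hk0p, hz, hs⟩ := hc d hd1 hdp
  refine ⟨q0, by omega, ?_⟩
  have hlen : l.length = (rotL l q0).length := (rotL_length l q0 (by omega)).symm
  apply pyLe_of_gt _ _ (d + k0) hlen (by omega)
  · intro k hk
    by_cases hkd : k < d
    · have hkq : k + q0 < l.length := by omega
      rw [rotL_getD l q0 k (by omega) (by omega), if_pos hkq,
          hmod (k + q0) hkq]
      have : (k + q0) % p = k := by
        conv_lhs => rw [show k + q0 = k + p * (l.length / p) by
          have := Nat.div_add_mod l.length p; omega]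
        rw [Nat.mul_comm, Nat.add_mul_mod_self_right, Nat.mod_eq_of_lt (by omega)]
      rw [this, hmod k (by omega), Nat.mod_eq_of_lt (by omega)]
  -- k ≥ d: rotation reads l[k-d], equal by the Lyndon zone
    · rw [rotL_getD l q0 k (by omega) (by omega), if_neg (by omega)]
      have h1 : k + q0 - l.length = k - d := by omega
      rw [h1, hmod k (by omega), Nat.mod_eq_of_lt (by omega)]
      have := hz (k - d) (by omega)
      rw [show k - d + d = k by omega] at this
      exact this.symm
  · rw [rotL_getD l q0 (d + k0) (by omega) (by omega), if_neg (by omega)]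
    have h1 : d + k0 + q0 - l.length = k0 := by omega
    rw [h1, hmod (d + k0) (by omega), Nat.mod_eq_of_lt (by omega)]
    rw [show k0 + d = d + k0 by omega] at hs
    exact hs

-- A returns False early (sequence[i] < sequence[i-period]): rotation by p is < the sequence
lemma rot_lt_of_drop (l : List Int) (i p : Nat) (hp : 1 ≤ p) (hpi : p ≤ i)
    (_hin : i < l.length) (hb : PerB l i p) (hlt : fIdx l i < fIdx l (i - p)) :
    pyLe l (rotL l p) = false := by
  have hlen : l.length = (rotL l p).length := (rotL_length l p (by omega)).symm
  apply pyLe_of_gt _ _ (i - p) hlen (by omega)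
  · intro k hk
    rw [rotL_getD l p k (by omega) (by omega), if_pos (by omega)]
    have h := hb (k + p) (by omega) (by omega)
    rw [Nat.add_sub_cancel] at h
    exact h.symm
  · rw [rotL_getD l p (i - p) (by omega) (by omega), if_pos (by omega),
        show i - p + p = i by omega]
    exact hlt

-- the hard step: after sequence[i] > sequence[i-period], the whole prefix l[0:i+1] is Lyndon
lemma lynW_step (l : List Int) (i p : Nat) (hp : 1 ≤ p) (hpi : p ≤ i) (_hin : i < l.length)
    (hb : PerB l i p) (hc : LynW l p) (hgt : fIdx l (i - p) < fIdx l i) :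
    LynW l (i + 1) := by
  have hmod := perB_mod l i p hp hb
  have hE : fIdx l (i % p) < fIdx l i := by
    have h1 : fIdx l (i - p) = fIdx l ((i - p) % p) := by
      by_cases h : i - p < i
      · exact hmod (i - p) h
      · have : p = 0 := by omega
        omega
    have h2 : (i - p) % p = i % p := by
      conv_rhs => rw [show i = (i - p) + p by omega]
      rw [Nat.add_mod_right]
    rw [h1, h2] at hgt
    exact hgt
  intro r hr1 hri
  have hri' : r ≤ i := by omega
  by_cases hr0 : r % p = 0
  · -- r is a multiple of p
    refine ⟨i - r, by omega, ?_, ?_⟩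
    · intro x hx
      have hxr : x + r < i := by omega
      rw [hmod x (by omega), hmod (x + r) hxr]
      congr 1
      conv_rhs => rw [show x + r = x + p * (r / p) by
        have := Nat.div_add_mod r p; omega]
      rw [Nat.mul_comm, Nat.add_mul_mod_self_right]
    · rw [show i - r + r = i by omega]
      have h1 : fIdx l (i - r) = fIdx l ((i - r) % p) := hmod (i - r) (by omega)
      have h2 : (i - r) % p = i % p := by
        conv_rhs => rw [show i = (i - r) + p * (r / p) by
          have := Nat.div_add_mod r p; omega]
        rw [Nat.mul_comm, Nat.add_mul_mod_self_right]
      rw [h1, h2]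
      exact hE
  · set r' := r % p with hr'def
    have hr'1 : 1 ≤ r' := by omega
    have hr'p : r' < p := Nat.mod_lt _ (by omega)
    obtain ⟨k0, hk0p, hz, hs⟩ := hc r' hr'1 hr'p
    have hkey : ∀ x, x + r' < p → (x + r) % p = x + r' := by
      intro x hx
      conv_lhs => rw [show x + r = (x + r') + p * (r / p) by
        have := Nat.div_add_mod r p; omega]
      rw [Nat.mul_comm, Nat.add_mul_mod_self_right, Nat.mod_eq_of_lt hx]
    have hzone : ∀ x, x < k0 → x + r < i → fIdx l x = fIdx l (x + r) := by
      intro x hx hxi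
      rw [hmod (x + r) hxi, hkey x (by omega), hmod x (by omega),
          Nat.mod_eq_of_lt (by omega)]
      exact hz x hx
    rcases lt_trichotomy (k0 + r) i with hlt | heq | hgt2
    · exact ⟨k0, by omega, fun x hx => hzone x hx (by omega), by
        rw [hmod (k0 + r) hlt, hkey k0 (by omega), hmod k0 (by omega),
            Nat.mod_eq_of_lt (by omega)]
        exact hs⟩
    · refine ⟨k0, by omega, fun x hx => hzone x hx (by omega), ?_⟩
      rw [heq]
      have h1 : i % p = k0 + r' := by rw [← heq, hkey k0 (by omega)]
      have h2 : fIdx l k0 = fIdx l (k0 % p) := hmod k0 (by omega)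
      rw [Nat.mod_eq_of_lt (by omega)] at h2
      calc fIdx l k0 < fIdx l (k0 + r') := hs
        _ = fIdx l (i % p) := by rw [h1]
        _ < fIdx l i := hE
    · -- i < k0 + r: witness at i - r, still inside the zone
      have hkik : i - r < k0 := by omega
      refine ⟨i - r, by omega, fun x hx => hzone x (by omega) (by omega), ?_⟩
      rw [show i - r + r = i by omega]
      have h1 : i % p = (i - r) + r' := by
        conv_lhs => rw [show i = (i - r) + r by omega]
        exact hkey (i - r) (by omega)
      calc fIdx l (i - r) = fIdx l ((i - r) + r') := hz (i - r) hkik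
        _ = fIdx l (i % p) := by rw [h1]
        _ < fIdx l i := hE

-- final value of the loop equals B
lemma final_eq (l : List Int) (p : Nat) (hp : 1 ≤ p) (hpn : p ≤ l.length)
    (hb : PerB l l.length p) (hc : LynW l p) :
    (PySem.Int.mod (l.length : Int) (p : Int) == 0) = if_nk_alt l := by
  by_cases hd : p ∣ l.length
  · have h1 : PySem.Int.mod (l.length : Int) (p : Int) = 0 := by
      rw [PySem.Int.mod_eq_zero_iff_dvd]
      exact_mod_cast hd
    have h2 : if_nk_alt l = true := (if_nk_alt_iff l).mpr (rots_ge_of_dvd l p hp hb hc hd)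
    rw [h1, h2]
    rfl
  · have h1 : PySem.Int.mod (l.length : Int) (p : Int) ≠ 0 := by
      rw [Ne, PySem.Int.mod_eq_zero_iff_dvd]
      exact_mod_cast hd
    rw [beq_eq_false_iff_ne.mpr h1]
    symm
    rw [Bool.eq_false_iff, Ne, if_nk_alt_iff]
    intro hall
    obtain ⟨q, hq, hfalse⟩ := rot_lt_of_not_dvd l p hp hpn hb hc hd
    rw [hall q hq] at hfalse
    exact absurd hfalse (by simp)

lemma pyGet?_idx (l : List Int) (j : Nat) (h : j < l.length) :
    PySem.List.pyGet? l (j : Int) = some (fIdx l j) := by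
  rw [PySem.List.pyGet?_ofNat l j h]
  unfold fIdx
  rw [List.getD_eq_getElem _ _ h]

-- main loop invariant: from any reachable state, the loop computes B's value
lemma loop_eq_alt (l : List Int) : ∀ (m i p : Nat), l.length ≤ i + m → 1 ≤ p → p ≤ i →
    i ≤ l.length → PerB l i p → LynW l p → if_nk_loop l i p = if_nk_alt l := by
  intro m
  induction m with
  | zero =>
    intro i p hm hp hpi hin hb hc
    have hi : i = l.length := by omega
    rw [if_nk_loop, dif_neg (by omega)]
    subst hi
    exact final_eq l p hp hpi hb hc
  | succ m ih =>
    intro i p hm hp hpi hin hb hc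
    by_cases hi : i < l.length
    · rw [if_nk_loop, dif_pos hi]
      have hip : i - p < l.length := by omega
      have hcast : (i : Int) - (p : Int) = ((i - p : Nat) : Int) := by omega
      rw [pyGet?_idx l i hi, hcast, pyGet?_idx l (i - p) hip]
      simp only []
      by_cases h1 : fIdx l (i - p) < fIdx l i
      · rw [if_pos h1]
        exact ih (i + 1) (i + 1) (by omega) (by omega) (by omega) (by omega)
          (fun j hj1 hj2 => by omega)
          (lynW_step l i p hp hpi hi hb hc h1)
      · rw [if_neg h1]
        by_cases h2 : fIdx l i < fIdx l (i - p)
        · rw [if_pos h2]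
          have hfalse := rot_lt_of_drop l i p hp hpi hi hb h2
          symm
          rw [Bool.eq_false_iff, Ne, if_nk_alt_iff]
          intro hall
          rw [hall p (by omega)] at hfalse
          exact absurd hfalse (by simp)
        · rw [if_neg h2]
          have heq : fIdx l i = fIdx l (i - p) := by omega
          refine ih (i + 1) p (by omega) hp (by omega) (by omega) ?_ hc
          intro j hj1 hj2
          by_cases hj : j < i
          · exact hb j hj1 hj
          · have : j = i := by omega
            subst this
            exact heq
    · rw [if_nk_loop, dif_neg hi]
      have hieq : i = l.length := by omega
      subst hieq
      exact final_eq l p hp hpi hb hc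

lemma port_eq (l : List Int) : if_nk l = if_nk_alt l := by
  unfold if_nk
  by_cases hn : l.length = 0
  · rw [if_nk_loop, dif_neg (by omega)]
    have hl : l = [] := List.length_eq_zero_iff.mp hn
    subst hl
    rfl
  · exact loop_eq_alt l (l.length - 1) 1 1 (by omega) le_rfl le_rfl (by omega)
      (fun j hj1 hj2 => by omega) (fun r hr1 hr2 => by omega)

-- ===== VERDICT (by name: the statement is the Claim_ definition above) =====
theorem if_nk_spec : Claim_equal_if_nk := by
  intro sequence _
  unfold Spec_if_nk
  exact port_eq sequence
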